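-- pv_equiv track=rewrite | github.com/A01377451/Mision-09 | Mision_09.py | intercambiarParejas
-- ===== SOURCE A (Python) =====
-- def intercambiarParejas(lista):
--     nuevaLista =[]
--     if len(lista)%2==0:
--         for k in range(0, len(lista),2):
--             nuevaLista.append(lista[k + 1])
--             nuevaLista.append(lista[k])
--     else:
--         for k in range(0, len(lista)-1, 2):
--             nuevaLista.append(lista[k + 1])
--             nuevaLista.append(lista[k])
--         nuevaLista.append(lista[-1])
--     return nuevaLista
-- ===== SOURCE B (Python) =====
-- def intercambiarParejas(lista):
--     pares = lista[0::2]
--     impares = lista[1::2]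
--     nueva = []
--     for b, a in zip(impares, pares):
--         nueva.append(b)
--         nueva.append(a)
--     if len(pares) > len(impares):
--         nueva.append(pares[-1])
--     return nueva
-- ===== Notes on version B (the rewrite author's own statement) =====
-- stated objective: alternative
-- what changed: Instead of index-stepping range(0,len,2) with an even/odd branch, B splits the list into the two strided slices lista[0::2] and lista[1::2], interleaves them with one zip pass, and appends the leftover even-position element when the slices differ in length.
import Mathlib
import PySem

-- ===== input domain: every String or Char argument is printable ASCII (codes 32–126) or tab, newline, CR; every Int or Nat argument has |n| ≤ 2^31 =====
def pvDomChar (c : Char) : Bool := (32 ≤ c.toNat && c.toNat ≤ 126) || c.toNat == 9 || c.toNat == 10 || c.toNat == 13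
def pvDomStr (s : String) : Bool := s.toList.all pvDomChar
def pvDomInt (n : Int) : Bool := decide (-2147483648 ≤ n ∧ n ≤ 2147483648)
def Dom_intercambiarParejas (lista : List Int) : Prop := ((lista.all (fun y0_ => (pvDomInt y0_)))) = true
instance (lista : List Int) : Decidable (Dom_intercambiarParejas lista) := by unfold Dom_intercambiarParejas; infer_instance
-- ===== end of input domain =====

-- B swaps adjacent pairs via two strided slices (lista[0::2], lista[1::2]) interleaved by one
-- zip pass instead of A's even/odd-branched index stepping; objective: alternative decomposition.

-- ===== PORT A =====
def intercambiarParejas (lista : List Int) : List Int :=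
  if (lista.length : Int) % 2 == 0 then
    (PySem.List.pyRange 0 (lista.length : Int) 2).foldl
      (fun acc k => acc ++ [PySem.List.pyGetD lista (k + 1) 0] ++ [PySem.List.pyGetD lista k 0]) []
  else
    ((PySem.List.pyRange 0 ((lista.length : Int) - 1) 2).foldl
      (fun acc k => acc ++ [PySem.List.pyGetD lista (k + 1) 0] ++ [PySem.List.pyGetD lista k 0]) [])
      ++ [PySem.List.pyGetD lista (-1) 0]

-- ===== PORT B =====
def intercambiarParejas_alt (lista : List Int) : List Int :=
  let pares := (PySem.List.slice? lista (some 0) none 2).getD []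
  let impares := (PySem.List.slice? lista (some 1) none 2).getD []
  let nueva := (impares.zip pares).foldl (fun acc p => acc ++ [p.1] ++ [p.2]) []
  if pares.length > impares.length then nueva ++ [PySem.List.pyGetD pares (-1) 0] else nueva

-- ===== PRECONDITION & SPEC =====
def Spec_intercambiarParejas (lista : List Int) (out : List Int) : Prop := out = intercambiarParejas_alt lista
instance (lista : List Int) (out : List Int) : Decidable (Spec_intercambiarParejas lista out) := by unfold Spec_intercambiarParejas; infer_instance

-- ===== CLAIM (what is proved, stated in full; the proofs are below) =====
def Claim_equal_intercambiarParejas : Prop := ∀ (lista : List Int), Dom_intercambiarParejas lista → Spec_intercambiarParejas lista (intercambiarParejas lista)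

-- ===== LEMMAS AND PROOFS =====

/-- The common two-at-a-time recursion both ports are reduced to. -/
def pvSwap : List Int → List Int
  | [] => []
  | [a] => [a]
  | a :: b :: t => b :: a :: pvSwap t

-- ---- B side: the strided slices as filterMaps over index ranges ----

theorem pvEvens_rep (xs : List Int) :
    (PySem.List.slice? xs (some 0) none 2).getD [] =
      (List.range ((xs.length + 1) / 2)).filterMap (fun k => xs[2 * k]?) := by
  simp [PySem.List.slice?, PySem.List.sliceIndices]
  have hc : (if 0 < xs.length then (((xs.length : Int) + 2 - 1) / 2).toNat else 0)
      = (xs.length + 1) / 2 := by split <;> omega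
  rw [hc]
  have hi : ∀ k : Nat, ((2 * (k : Int)).toNat) = 2 * k := by intro k; omega
  simp [hi]

theorem pvOdds_rep (xs : List Int) :
    (PySem.List.slice? xs (some 1) none 2).getD [] =
      (List.range (xs.length / 2)).filterMap (fun k => xs[1 + 2 * k]?) := by
  cases xs with
  | nil => decide
  | cons a t =>
    simp [PySem.List.slice?, PySem.List.sliceIndices]
    have hc : (if 0 < t.length then (((t.length : Int) + 2 - 1) / 2).toNat else 0)
        = (t.length + 1) / 2 := by split <;> omega
    rw [hc]
    have hi : ∀ k : Nat, ((1 + 2 * (k : Int)).toNat) = 1 + 2 * k := by intro k; omega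
    simp [hi]

theorem pvEvens_cons₂ (a b : Int) (t : List Int) :
    (PySem.List.slice? (a :: b :: t) (some 0) none 2).getD [] =
      a :: (PySem.List.slice? t (some 0) none 2).getD [] := by
  rw [pvEvens_rep, pvEvens_rep]
  have hk : ∀ k : Nat, 2 * (k + 1) = 2 * k + 1 + 1 := by intro k; omega
  have h : (a :: b :: t).length + 1 = (t.length + 1) + 2 := by simp
  have h2 : ((t.length + 1) + 2) / 2 = (t.length + 1) / 2 + 1 := by omega
  rw [h, h2, List.range_succ_eq_map]
  simp [List.filterMap_map, hk]

theorem pvOdds_cons₂ (a b : Int) (t : List Int) :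
    (PySem.List.slice? (a :: b :: t) (some 1) none 2).getD [] =
      b :: (PySem.List.slice? t (some 1) none 2).getD [] := by
  rw [pvOdds_rep, pvOdds_rep]
  have hk : ∀ k : Nat, 1 + 2 * (k + 1) = 1 + 2 * k + 1 + 1 := by intro k; omega
  have h : (a :: b :: t).length = t.length + 2 := by simp
  have h2 : (t.length + 2) / 2 = t.length / 2 + 1 := by omega
  rw [h, h2, List.range_succ_eq_map]
  simp [List.filterMap_map, hk]

theorem pvZipFold (l : List (Int × Int)) (acc : List Int) :
    l.foldl (fun acc p => acc ++ [p.1] ++ [p.2]) acc = acc ++ l.flatMap (fun p => [p.1, p.2]) := by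
  induction l generalizing acc with
  | nil => simp
  | cons p l ih => simp [List.foldl_cons, List.flatMap]

theorem pvB_nil : intercambiarParejas_alt [] = [] := by decide

theorem pvB_single (a : Int) : intercambiarParejas_alt [a] = [a] := by
  simp [intercambiarParejas_alt, PySem.List.slice?, PySem.List.sliceIndices,
    PySem.List.pyGetD, PySem.List.pyGet?, PySem.List.pyIdx?]

theorem pvB_cons₂ (a b : Int) (t : List Int) :
    intercambiarParejas_alt (a :: b :: t) = b :: a :: intercambiarParejas_alt t := by
  simp only [intercambiarParejas_alt, pvEvens_cons₂, pvOdds_cons₂, List.zip_cons_cons,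
    List.length_cons, pvZipFold]
  set P := (PySem.List.slice? t (some 0) none 2).getD [] with hPdef
  set I := (PySem.List.slice? t (some 1) none 2).getD [] with hIdef
  by_cases h : P.length > I.length
  · have hP : P ≠ [] := by
      intro hnil; rw [hnil] at h; simp at h
    simp only [if_pos h, if_pos (by omega : P.length + 1 > I.length + 1)]
    rw [PySem.List.pyGetD_neg_one (a :: P) 0 (by simp), PySem.List.pyGetD_neg_one P 0 hP,
      List.getLast_cons hP]
    simp
  · simp only [if_neg h, if_neg (by omega : ¬ (P.length + 1 > I.length + 1))]
    simp

-- ---- A side: the stepped range loop as a flatMap over pair indices ----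

theorem pvALoopAux (xs : List Int) (m : Nat) (acc : List Int) :
    (List.range m).foldl
      (fun acc (k : Nat) => acc ++ [PySem.List.pyGetD xs ((0 : Int) + 2 * (k : Int) + 1) 0]
        ++ [PySem.List.pyGetD xs ((0 : Int) + 2 * (k : Int)) 0]) acc
    = acc ++ (List.range m).flatMap (fun k => [xs.getD (2 * k + 1) 0, xs.getD (2 * k) 0]) := by
  induction m generalizing acc with
  | zero => simp
  | succ n ih =>
    rw [List.range_succ, List.foldl_append, ih, List.flatMap_append]
    simp only [List.flatMap, List.map_cons, List.map_nil, List.flatten_cons, List.flatten_nil,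
      List.foldl_cons, List.foldl_nil]
    rw [show (0 : Int) + 2 * (n : Nat) + 1 = ((2 * n + 1 : Nat) : Int) by push_cast; ring,
      show (0 : Int) + 2 * (n : Nat) = ((2 * n : Nat) : Int) by push_cast; ring,
      PySem.List.pyGetD_natCast, PySem.List.pyGetD_natCast]
    simp

theorem pvALoop (xs : List Int) (m : Nat) :
    (PySem.List.pyRange 0 (2 * (m : Int)) 2).foldl
      (fun acc k => acc ++ [PySem.List.pyGetD xs (k + 1) 0] ++ [PySem.List.pyGetD xs k 0]) []
    = (List.range m).flatMap (fun k => [xs.getD (2 * k + 1) 0, xs.getD (2 * k) 0]) := by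
  have hr : PySem.List.pyRange 0 (2 * (m : Int)) 2
      = (List.range m).map (fun k : Nat => (0 : Int) + 2 * (k : Int)) := by
    rw [PySem.List.pyRange_of_pos 0 (2 * (m : Int)) (by norm_num)]
    congr 1
    have h : (if 0 < 2 * (m : Int) then ((2 * (m : Int) - 0 + 2 - 1) / 2).toNat else 0) = m := by
      split <;> omega
    rw [h]
  rw [hr, List.foldl_map]
  simpa using pvALoopAux xs m []

theorem pvPairShift (a b : Int) (t : List Int) (m : Nat) :
    (List.range (m + 1)).flatMap
      (fun k => [(a :: b :: t).getD (2 * k + 1) 0, (a :: b :: t).getD (2 * k) 0])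
    = b :: a :: (List.range m).flatMap (fun k => [t.getD (2 * k + 1) 0, t.getD (2 * k) 0]) := by
  rw [List.range_succ_eq_map]
  have h2 : ∀ k : Nat, 2 * (k + 1) = 2 * k + 1 + 1 := by intro k; omega
  simp [List.flatMap_cons, List.flatMap_map, h2]

theorem pvA_nil : intercambiarParejas [] = [] := by decide

theorem pvA_single (a : Int) : intercambiarParejas [a] = [a] := by
  simp [intercambiarParejas, PySem.List.pyRange, PySem.List.pyGetD,
    PySem.List.pyGet?, PySem.List.pyIdx?]

theorem pvA_cons₂ (a b : Int) (t : List Int) :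
    intercambiarParejas (a :: b :: t) = b :: a :: intercambiarParejas t := by
  simp only [intercambiarParejas, List.length_cons]
  by_cases h : t.length % 2 = 0
  · have hp : (((t.length + 1 + 1 : Nat) : Int) % 2 == 0) = true := by simp; omega
    have hp' : (((t.length : Nat) : Int) % 2 == 0) = true := by simp; omega
    rw [hp, hp']
    simp only [if_true]
    rw [show ((t.length + 1 + 1 : Nat) : Int) = 2 * ((t.length / 2 + 1 : Nat) : Int) by push_cast; omega,
      show ((t.length : Nat) : Int) = 2 * ((t.length / 2 : Nat) : Int) by push_cast; omega,
      pvALoop, pvALoop]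
    exact pvPairShift a b t (t.length / 2)
  · have hp : (((t.length + 1 + 1 : Nat) : Int) % 2 == 0) = false := by simp; omega
    have hp' : (((t.length : Nat) : Int) % 2 == 0) = false := by simp; omega
    rw [hp, hp']
    simp only [Bool.false_eq_true, if_false]
    have ht : t ≠ [] := by intro hnil; rw [hnil] at h; simp at h
    rw [show ((t.length + 1 + 1 : Nat) : Int) - 1 = 2 * ((t.length / 2 + 1 : Nat) : Int) by push_cast; omega,
      show ((t.length : Nat) : Int) - 1 = 2 * ((t.length / 2 : Nat) : Int) by push_cast; omega,
      pvALoop, pvALoop, pvPairShift a b t (t.length / 2),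
      PySem.List.pyGetD_neg_one (a :: b :: t) 0 (by simp),
      PySem.List.pyGetD_neg_one t 0 ht, List.getLast_cons (by simp), List.getLast_cons ht]
    simp

-- ---- both ports equal the two-at-a-time recursion ----

theorem pvA_eq_swap (xs : List Int) : intercambiarParejas xs = pvSwap xs := by
  induction xs using pvSwap.induct with
  | case1 => exact pvA_nil
  | case2 a => exact pvA_single a
  | case3 a b t ih => rw [pvA_cons₂, ih, pvSwap]

theorem pvB_eq_swap (xs : List Int) : intercambiarParejas_alt xs = pvSwap xs := by
  induction xs using pvSwap.induct with
  | case1 => exact pvB_nil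
  | case2 a => exact pvB_single a
  | case3 a b t ih => rw [pvB_cons₂, ih, pvSwap]

-- ===== VERDICT (by name: the statement is the Claim_ definition above) =====
theorem intercambiarParejas_spec : Claim_equal_intercambiarParejas := by
  intro lista _
  unfold Spec_intercambiarParejas
  rw [pvA_eq_swap, pvB_eq_swap]
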